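-- pv_equiv track=rewrite | github.com/sammcj/scripts | docker/compose-tree/compose_tree.py | build_dependents_graph
-- ===== SOURCE A (Python) =====
-- def build_dependents_graph(
--     dependencies: dict[str, list[str]],
-- ) -> dict[str, list[str]]:
--     """Build inverse mapping: service -> services that depend on it."""
--     dependents: dict[str, list[str]] = {name: [] for name in dependencies}
--
--     for service, deps in dependencies.items():
--         for dep in deps:
--             if dep in dependents:
--                 dependents[dep].append(service)
--
--     return dependents
-- ===== SOURCE B (Python) =====
-- def build_dependents_graph(
--     dependencies: dict[str, list[str]],
-- ) -> dict[str, list[str]]: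
--     """Build inverse mapping: service -> services that depend on it."""
--     return {
--         name: [
--             service
--             for service, deps in dependencies.items()
--             for d in deps
--             if d == name
--         ]
--         for name in dependencies
--     }
-- ===== Notes on version B (the rewrite author's own statement) =====
-- stated objective: idiomatic
-- what changed: Replaces A's mutation of a pre-initialised dict via a single edge pass with one dict comprehension that, for each service name, scans all dependency lists and collects every service whose deps mention that name (per-occurrence, preserving duplicates and order).
import Mathlib
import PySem

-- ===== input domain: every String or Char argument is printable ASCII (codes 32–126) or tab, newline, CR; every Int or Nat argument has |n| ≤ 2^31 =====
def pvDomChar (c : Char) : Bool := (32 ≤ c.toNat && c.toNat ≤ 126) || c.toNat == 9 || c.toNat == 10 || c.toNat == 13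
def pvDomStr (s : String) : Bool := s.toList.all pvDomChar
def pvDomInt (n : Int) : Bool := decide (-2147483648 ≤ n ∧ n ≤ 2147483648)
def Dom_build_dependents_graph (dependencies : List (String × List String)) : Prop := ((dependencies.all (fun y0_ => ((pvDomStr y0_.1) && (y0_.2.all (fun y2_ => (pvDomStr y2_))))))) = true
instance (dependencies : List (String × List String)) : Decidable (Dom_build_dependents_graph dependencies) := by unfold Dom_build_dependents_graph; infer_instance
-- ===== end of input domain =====

-- B replaces A's dict mutation (one edge pass appending into a pre-initialised dict) with a
-- single dict comprehension that, for each name, scans every service's deps and collects the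
-- services per matching occurrence (objective: idiomatic).

-- ===== PORT A =====
def build_dependents_graph (dependencies : List (String × List String)) : List (String × List String) :=
  -- dependents = {name: [] for name in dependencies}
  let dependents : PySem.Dict String (List String) :=
    dependencies.foldl (fun d p => d.insert p.1 []) PySem.Dict.empty
  -- for service, deps in dependencies.items(): for dep in deps: if dep in dependents: append
  let dependents :=
    dependencies.foldl (fun d p =>
      p.2.foldl (fun d dep =>
        if d.contains dep then d.modify dep [] (fun l => l ++ [p.1]) else d) d) dependents
  dependents.items

-- ===== PORT B =====
def build_dependents_graph_alt (dependencies : List (String × List String)) : List (String × List String) :=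
  dependencies.map (fun p =>
    (p.1, dependencies.flatMap (fun q => (q.2.filter (fun d => d == p.1)).map (fun _ => q.1))))

-- ===== PRECONDITION & SPEC =====
-- Pre_ says the association list encodes a genuine Python dict: its keys are pairwise distinct
-- (a list with duplicated keys does not arise as a dict argument of A).
def Pre_build_dependents_graph (dependencies : List (String × List String)) : Prop :=
  (dependencies.map Prod.fst).Nodup
instance (dependencies : List (String × List String)) : Decidable (Pre_build_dependents_graph dependencies) := by unfold Pre_build_dependents_graph; infer_instance
def pvWitness_build_dependents_graph : (List (String × List String)) :=
  [("a", ["b", "c"]), ("b", ["b"])]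
def Spec_build_dependents_graph (dependencies : List (String × List String)) (out : List (String × List String)) : Prop := out = build_dependents_graph_alt dependencies
instance (dependencies : List (String × List String)) (out : List (String × List String)) : Decidable (Spec_build_dependents_graph dependencies out) := by unfold Spec_build_dependents_graph; infer_instance

-- ===== CLAIM (what is proved, stated in full; the proofs are below) =====
def Claim_equal_build_dependents_graph : Prop := ∀ (dependencies : List (String × List String)), Dom_build_dependents_graph dependencies → Pre_build_dependents_graph dependencies → Spec_build_dependents_graph dependencies (build_dependents_graph dependencies)

-- ===== LEMMAS AND PROOFS =====

def stepA (d : PySem.Dict String (List String)) (e : String × String) : PySem.Dict String (List String) :=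
  if d.contains e.1 then d.modify e.1 [] (fun l => l ++ [e.2]) else d

lemma guard_elim (c : String → Bool) :
    ∀ (E : List (String × String)) (d : PySem.Dict String (List String)),
      (∀ k, d.contains k = c k) →
      E.foldl stepA d
        = (E.filter (fun e => c e.1)).foldl (fun d e => d.modify e.1 [] (fun l => l ++ [e.2])) d := by
  intro E
  induction E with
  | nil => intro d h; rfl
  | cons e E ih =>
    intro d h
    simp only [List.foldl_cons, List.filter_cons]
    by_cases hc : c e.1 = true
    · have h' : ∀ k, (d.modify e.1 [] (fun l => l ++ [e.2])).contains k = c k := by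
        intro k
        rw [PySem.Dict.contains_modify]
        by_cases hk : k = e.1
        · subst hk; simp [hc]
        · simp [hk, h k]
      simp only [hc, if_true, List.foldl_cons, stepA, h e.1]
      exact ih _ h'
    · simp only [Bool.not_eq_true] at hc
      simp only [hc, Bool.false_eq_true, if_false, stepA, h e.1]
      exact ih _ h

theorem ports_agree (dependencies : List (String × List String))
    (hnd : (dependencies.map Prod.fst).Nodup) :
    build_dependents_graph dependencies = build_dependents_graph_alt dependencies := by
  unfold build_dependents_graph build_dependents_graph_alt
  set d0 : PySem.Dict String (List String) :=
    dependencies.foldl (fun d p => d.insert p.1 []) PySem.Dict.empty with hd0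
  have hitems0 : d0.items = dependencies.map (fun p => (p.1, ([] : List String))) := by
    have := PySem.Dict.items_foldl_insert_fresh (l := dependencies) (k := Prod.fst)
      (v := fun _ => ([] : List String)) (d := PySem.Dict.empty)
      (by intro a _; exact PySem.Dict.contains_empty _) hnd
    simpa [hd0] using this
  have hkeys0 : d0.keys = dependencies.map Prod.fst := by
    simp [PySem.Dict.keys, hitems0, List.map_map, Function.comp]
  have hnd0 : d0.keys.Nodup := by rw [hkeys0]; exact hnd
  set E : List (String × String) :=
    dependencies.flatMap (fun p => p.2.map (fun dep => (dep, p.1))) with hE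
  have hflat :
      dependencies.foldl (fun d p =>
        p.2.foldl (fun d dep =>
          if d.contains dep then d.modify dep [] (fun l => l ++ [p.1]) else d) d) d0
      = E.foldl stepA d0 := by
    rw [hE, List.foldl_flatMap]
    simp only [List.foldl_map, stepA]
  show (dependencies.foldl (fun d p =>
        p.2.foldl (fun d dep =>
          if d.contains dep then d.modify dep [] (fun l => l ++ [p.1]) else d) d) d0).items = _
  rw [hflat]
  rw [guard_elim (fun k => d0.contains k) E d0 (fun k => rfl)]
  set Ef := E.filter (fun e => d0.contains e.1) with hEf
  set r := Ef.foldl (fun d e => d.modify e.1 [] (fun l => l ++ [e.2])) d0 with hr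
  have hkeysr : r.keys = d0.keys := by
    rw [hr, PySem.Dict.keys_foldl_modify_key]
    rw [PySem.Set.update_eq_append_filter]
    have hmem : ∀ a ∈ PySem.Set.ofList (Ef.map Prod.fst), a ∈ d0.keys := by
      intro a ha
      obtain ⟨e, he, rfl⟩ := List.mem_map.mp ((PySem.Set.mem_ofList _ _).mp ha)
      exact (PySem.Dict.contains_iff_mem_keys _ _).mp (List.mem_filter.mp he).2
    rw [List.filter_eq_nil_iff.mpr
      (fun a ha => by simpa using hmem a ha)]
    simp
  have hndr : r.keys.Nodup := hkeysr ▸ hnd0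
  have hgetD : ∀ k, k ∈ d0.keys → r.getD k [] =
      dependencies.flatMap (fun q => (q.2.filter (fun d => d == k)).map (fun _ => q.1)) := by
    intro k hk
    rw [hr, PySem.Dict.getD_foldl_modify_append]
    have hz : d0.getD k [] = [] := by
      obtain ⟨p, hp, rfl⟩ := List.mem_map.mp (hkeys0 ▸ hk)
      exact PySem.Dict.getD_of_mem_items d0 (hitems0 ▸ List.mem_map_of_mem hp) hnd0 []
    rw [hz, List.nil_append, hEf, List.filter_filter]
    have hfe : E.filter (fun e => e.1 == k && d0.contains e.1) = E.filter (fun e => e.1 == k) := by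
      apply List.filter_congr
      intro e _
      by_cases h1 : e.1 = k
      · simp [h1, (PySem.Dict.contains_iff_mem_keys _ _).mpr hk]
      · simp [h1]
    rw [hfe, hE, List.filter_flatMap, List.map_flatMap]
    congr 1
    funext q
    simp [List.filter_map, Function.comp_def]
  rw [PySem.Dict.items_eq_map_keys r hndr [], hkeysr, hkeys0, List.map_map]
  apply List.map_congr_left
  intro p hp
  simp only [Function.comp]
  rw [hgetD p.1 (by rw [hkeys0]; exact List.mem_map_of_mem hp)]

-- ===== VERDICT (by name: the statement is the Claim_ definition above) =====
theorem build_dependents_graph_spec : Claim_equal_build_dependents_graph := by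
  intro dependencies _ hpre
  unfold Spec_build_dependents_graph
  exact ports_agree dependencies hpre
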